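-- pv_equiv track=rewrite | github.com/adamfitzgibbon/algorithms | advent-of-code/2015/day-2/2.2.py | find_perim
-- ===== SOURCE A (Python) =====
-- def find_perim(dims):
--   maxIndex = 0
--   for i, dim in enumerate(dims):
--     if dim > dims[maxIndex]:
--       maxIndex = i
--   perim = 0
--   for i, dim in enumerate(dims):
--     if i != maxIndex:
--       perim += dim * 2
--   return perim
-- ===== SOURCE B (Python) =====
-- def find_perim(dims):
--   return 2 * sum(sorted(dims)[:-1])
-- ===== Notes on version B (the rewrite author's own statement) =====
-- stated objective: simpler
-- what changed: Replaces the two explicit index-tracking passes (find first max index, then sum skipping that index) with a one-liner: sort, drop the largest element, sum the rest and double.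
import Mathlib
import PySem

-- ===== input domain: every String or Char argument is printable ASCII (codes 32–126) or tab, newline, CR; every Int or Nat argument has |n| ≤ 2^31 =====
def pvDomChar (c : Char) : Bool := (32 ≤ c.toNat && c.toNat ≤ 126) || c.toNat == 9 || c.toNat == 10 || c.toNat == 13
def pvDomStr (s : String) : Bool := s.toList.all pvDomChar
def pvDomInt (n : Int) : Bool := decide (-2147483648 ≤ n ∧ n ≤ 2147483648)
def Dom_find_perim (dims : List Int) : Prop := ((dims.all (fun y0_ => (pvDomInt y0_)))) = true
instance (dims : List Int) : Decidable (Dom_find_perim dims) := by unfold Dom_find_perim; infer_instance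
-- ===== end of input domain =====

-- B replaces A's two index-tracking passes with sort-drop-largest-sum-double; objective: simpler.


-- ===== PORT A =====
-- literal port: first loop finds the index of the first maximum (pyGetD's default is a
-- totalizing guard only: maxIndex is always in range whenever the access is reached)
def find_perim (dims : List Int) : Int :=
  let maxIndex : Int := (PySem.List.enumerate dims 0).foldl
    (fun mi p => if PySem.List.pyGetD dims mi 0 < p.2 then p.1 else mi) 0
  (PySem.List.enumerate dims 0).foldl
    (fun perim p => if p.1 ≠ maxIndex then perim + p.2 * 2 else perim) 0

-- ===== PORT B =====
def find_perim_alt (dims : List Int) : Int :=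
  2 * (PySem.List.slice (PySem.List.sorted dims (fun x => x) false) none (some (-1))).sum

-- ===== PRECONDITION & SPEC =====
def Spec_find_perim (dims : List Int) (out : Int) : Prop := out = find_perim_alt dims
instance (dims : List Int) (out : Int) : Decidable (Spec_find_perim dims out) := by unfold Spec_find_perim; infer_instance

-- ===== CLAIM (what is proved, stated in full; the proofs are below) =====
def Claim_equal_find_perim : Prop := ∀ (dims : List Int), Dom_find_perim dims → Spec_find_perim dims (find_perim dims)

-- ===== LEMMAS AND PROOFS =====

-- Loop 1 invariant: starting from a valid index mi, the fold over the suffix of dims at s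
-- returns a valid index k whose element dominates dims[mi] and every element of the suffix.
theorem pv_loop1 (dims : List Int) : ∀ (xs : List Int) (s mi : Nat),
    xs = dims.drop s → mi < dims.length →
    ∃ k : Nat, (PySem.List.enumerate xs (s : Int)).foldl
        (fun m p => if PySem.List.pyGetD dims m 0 < p.2 then p.1 else m) (mi : Int) = (k : Int) ∧
      k < dims.length ∧
      PySem.List.pyGetD dims (mi : Int) 0 ≤ PySem.List.pyGetD dims (k : Int) 0 ∧
      ∀ y ∈ xs, y ≤ PySem.List.pyGetD dims (k : Int) 0 := by
  intro xs
  induction xs with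
  | nil =>
    intro s mi _ hmi
    exact ⟨mi, by simp [PySem.List.enumerate_nil], hmi, le_refl _, by simp⟩
  | cons x rest ih =>
    intro s mi hdrop hmi
    have hs : s < dims.length := by
      by_contra hle
      rw [List.drop_eq_nil_of_le (Nat.le_of_not_lt hle)] at hdrop
      simp at hdrop
    have hdrop' : dims.drop s = x :: rest := hdrop.symm
    have hx : PySem.List.pyGetD dims (s : Int) 0 = x := by
      rw [PySem.List.pyGetD_natCast]
      have h0 : (dims.drop s)[0]'(by rw [hdrop']; simp) = x := by
        simp [hdrop']
      rw [List.getElem_drop] at h0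
      rw [List.getD_eq_getElem dims 0 (by omega)]
      simpa using h0
    have hrest : rest = dims.drop (s + 1) := by
      have hcg := congrArg (List.drop 1) hdrop'
      simp [List.drop_drop] at hcg
      exact hcg.symm
    rw [PySem.List.enumerate_cons]
    simp only [List.foldl_cons]
    by_cases hc : PySem.List.pyGetD dims (mi : Int) 0 < x
    · rw [if_pos hc]
      rw [show ((s : Int) + 1) = ((s + 1 : Nat) : Int) by push_cast; ring]
      obtain ⟨k, hk, hklen, hkge, hkall⟩ := ih (s + 1) s hrest hs
      refine ⟨k, hk, hklen, ?_, ?_⟩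
      · exact le_trans (le_of_lt hc) (hx ▸ hkge)
      · intro y hy
        rcases List.mem_cons.mp hy with h | h
        · exact h ▸ (hx ▸ hkge)
        · exact hkall y h
    · rw [if_neg hc]
      rw [show ((s : Int) + 1) = ((s + 1 : Nat) : Int) by push_cast; ring]
      obtain ⟨k, hk, hklen, hkge, hkall⟩ := ih (s + 1) mi hrest hmi
      refine ⟨k, hk, hklen, hkge, ?_⟩
      intro y hy
      rcases List.mem_cons.mp hy with h | h
      · exact le_trans (h ▸ not_lt.mp hc) hkge
      · exact hkall y h

-- Loop 2, case "index m lies before the enumeration": every element is added.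
theorem pv_loop2a (m : Int) : ∀ (xs : List Int) (s : Nat) (acc : Int), m < (s : Int) →
    (PySem.List.enumerate xs (s : Int)).foldl
      (fun perim p => if p.1 ≠ m then perim + p.2 * 2 else perim) acc
      = acc + 2 * xs.sum := by
  intro xs
  induction xs with
  | nil => intro s acc _; simp [PySem.List.enumerate_nil]
  | cons x rest ih =>
    intro s acc hm
    rw [PySem.List.enumerate_cons]
    simp only [List.foldl_cons]
    rw [if_pos (show (s : Int) ≠ m by omega)]
    rw [show ((s : Int) + 1) = ((s + 1 : Nat) : Int) by push_cast; ring]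
    rw [ih (s + 1) (acc + x * 2) (by push_cast; omega)]
    simp [List.sum_cons]
    ring

-- Loop 2: exactly the element at index k is skipped (doubled sum of the others).
theorem pv_loop2b (k : Nat) : ∀ (xs : List Int) (s : Nat) (acc : Int),
    s ≤ k → k < s + xs.length →
    (PySem.List.enumerate xs (s : Int)).foldl
      (fun perim p => if p.1 ≠ (k : Int) then perim + p.2 * 2 else perim) acc
      = acc + 2 * xs.sum - 2 * xs.getD (k - s) 0 := by
  intro xs
  induction xs with
  | nil => intro s acc h1 h2; simp at h2; omega
  | cons x rest ih =>
    intro s acc h1 h2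
    rw [PySem.List.enumerate_cons]
    simp only [List.foldl_cons]
    by_cases hsk : s = k
    · rw [if_neg (by simp [hsk])]
      rw [show ((s : Int) + 1) = ((s + 1 : Nat) : Int) by push_cast; ring]
      rw [pv_loop2a (k : Int) rest (s + 1) acc (by push_cast; omega)]
      rw [show k - s = 0 by omega]
      simp [List.sum_cons]
      ring
    · rw [if_pos (show (s : Int) ≠ (k : Int) by omega)]
      rw [show ((s : Int) + 1) = ((s + 1 : Nat) : Int) by push_cast; ring]
      rw [ih (s + 1) (acc + x * 2) (by omega) (by simp at h2 ⊢; omega)]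
      rw [show k - s = (k - (s + 1)) + 1 by omega]
      rw [List.getD_cons_succ]
      simp [List.sum_cons]
      ring

-- B's dropped element: the last element of sorted(dims) is a maximum of dims.
theorem pv_last_sorted_max (dims : List Int) (h : dims ≠ []) :
    ∃ v, (PySem.List.sorted dims (fun x => x) false).getLast? = some v ∧
      v ∈ dims ∧ ∀ y ∈ dims, y ≤ v := by
  have hne : PySem.List.sorted dims (fun x => x) false ≠ [] := by
    simpa [PySem.List.sorted_eq_nil_iff] using h
  refine ⟨(PySem.List.sorted dims (fun x => x) false).getLast hne,
    List.getLast?_eq_some_getLast hne, ?_, ?_⟩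
  · rw [← PySem.List.mem_sorted dims (fun x => x) false]
    exact List.getLast_mem hne
  · intro y hy
    rw [← PySem.List.mem_sorted dims (fun x => x) false] at hy
    obtain ⟨p, hp, hpy⟩ := List.mem_iff_getElem.mp hy
    rw [List.getLast_eq_getElem]
    rw [← hpy]
    exact PySem.List.sorted_id_getElem_mono dims (by omega) (by omega)

-- B computes twice (sum minus the last element of sorted(dims)).
theorem pv_alt_eq (dims : List Int) (v : Int)
    (hv : (PySem.List.sorted dims (fun x => x) false).getLast? = some v) :
    find_perim_alt dims = 2 * (dims.sum - v) := by
  unfold find_perim_alt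
  rw [PySem.List.slice_to_neg_one]
  have hne : PySem.List.sorted dims (fun x => x) false ≠ [] := by
    intro hnil
    rw [hnil] at hv
    simp at hv
  have hvl : (PySem.List.sorted dims (fun x => x) false).getLast hne = v := by
    rw [List.getLast?_eq_some_getLast hne] at hv
    exact Option.some.inj hv
  have hsum : (PySem.List.sorted dims (fun x => x) false).sum = dims.sum :=
    (PySem.List.sorted_perm dims (fun x => x) false).sum_eq
  have hdl : (PySem.List.sorted dims (fun x => x) false).dropLast.sum
      = (PySem.List.sorted dims (fun x => x) false).sum - v := by
    have hcat := List.dropLast_concat_getLast hne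
    have h2 : (PySem.List.sorted dims (fun x => x) false).sum
        = (PySem.List.sorted dims (fun x => x) false).dropLast.sum + v := by
      conv_lhs => rw [← hcat]
      simp [hvl]
    omega
  rw [hdl, hsum]

-- ===== VERDICT (by name: the statement is the Claim_ definition above) =====
theorem find_perim_spec : Claim_equal_find_perim := by
  unfold Claim_equal_find_perim
  intro dims _
  unfold Spec_find_perim
  cases dims with
  | nil => rfl
  | cons d ds =>
    have hne : d :: ds ≠ [] := by simp
    obtain ⟨k, hk, hklen, _, hkall⟩ :=
      pv_loop1 (d :: ds) (d :: ds) 0 0 (by simp) (by simp)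
    simp only [Nat.cast_zero] at hk
    have hA : find_perim (d :: ds) = 2 * (d :: ds).sum - 2 * (d :: ds).getD k 0 := by
      simp only [find_perim]
      rw [hk]
      have h2 := pv_loop2b k (d :: ds) 0 0 (by omega) (by simpa using hklen)
      simp only [Nat.cast_zero, Nat.sub_zero] at h2
      rw [h2]
      ring
    obtain ⟨v, hv, hvmem, hvmax⟩ := pv_last_sorted_max (d :: ds) hne
    have hB := pv_alt_eq (d :: ds) v hv
    have hgd : (d :: ds).getD k 0 = (d :: ds)[k]'hklen :=
      List.getD_eq_getElem (d :: ds) 0 hklen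
    have hmem : (d :: ds).getD k 0 ∈ (d :: ds) := by
      rw [hgd]; exact List.getElem_mem hklen
    have hle1 : v ≤ (d :: ds).getD k 0 := by
      have := hkall v hvmem
      rwa [PySem.List.pyGetD_natCast] at this
    have hle2 : (d :: ds).getD k 0 ≤ v := hvmax _ hmem
    rw [hA, hB]
    omega
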